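-- pv_equiv track=rewrite | github.com/chae-yoon/algorithm | 프로그래머스/lv0/120815. 피자 나눠 먹기 （2）/피자 나눠 먹기 （2）.py | solution
-- ===== SOURCE A (Python) =====
-- def solution(n):
--     answer = 1
--     num, pizza = 2, 6
--     guide = 6 if n > 6 else n
--
--     while num <= guide:
--         if pizza % num == 0 and n % num == 0:
--             answer *= num
--             pizza //= num
--             n //= num
--             num = 2
--         else:
--             num += 1
--
--     answer = answer * pizza * n // 6
--
--     return answer
-- ===== SOURCE B (Python) =====
-- import math
--
-- def solution(n):
--     return n // math.gcd(n, 6)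
-- ===== Notes on version B (the rewrite author's own statement) =====
-- stated objective: simpler
-- what changed: Replaces A's factor-stripping while loop (mutating n and pizza, resetting num) by the closed form n // gcd(n, 6).
-- outside the precondition, e.g. on solution(-6): A returns -6, B returns -1
import Mathlib
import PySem

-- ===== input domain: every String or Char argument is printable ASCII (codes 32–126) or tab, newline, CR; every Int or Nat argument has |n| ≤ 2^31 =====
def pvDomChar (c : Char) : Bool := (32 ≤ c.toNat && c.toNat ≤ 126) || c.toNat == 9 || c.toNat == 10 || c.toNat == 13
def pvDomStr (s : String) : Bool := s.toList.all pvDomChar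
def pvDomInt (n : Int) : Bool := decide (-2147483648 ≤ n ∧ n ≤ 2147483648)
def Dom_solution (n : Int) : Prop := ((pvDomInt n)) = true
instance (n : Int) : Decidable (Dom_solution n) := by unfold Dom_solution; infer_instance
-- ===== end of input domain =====

-- B replaces A's factor-stripping while loop by the closed form n // gcd(n, 6) (objective: simpler).

-- ===== PORT A =====
-- the while loop of A, state (answer, num, pizza, n); fuel only makes the loop total
-- (100 is always enough for the states `solution` reaches: pizza starts at 6 and num ≤ 7)
def loopA : Nat → Int → Int → Int → Int → Int → Int × Int × Int
  | 0, _, answer, _, pizza, m => (answer, pizza, m)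
  | fuel+1, guide, answer, num, pizza, m =>
    if num ≤ guide then
      if PySem.Int.mod pizza num = 0 ∧ PySem.Int.mod m num = 0 then
        loopA fuel guide (answer * num) 2 (PySem.Int.floordiv pizza num) (PySem.Int.floordiv m num)
      else
        loopA fuel guide answer (num + 1) pizza m
    else (answer, pizza, m)

def solution (n : Int) : Int :=
  let guide : Int := if 6 < n then 6 else n
  let s := loopA 100 guide 1 2 6 n
  PySem.Int.floordiv (s.1 * s.2.1 * s.2.2) 6

-- ===== PORT B =====
def solution_alt (n : Int) : Int :=
  PySem.Int.floordiv n ((Int.gcd n 6 : Nat) : Int)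

-- ===== PRECONDITION & SPEC =====
-- Pre_ excludes negative n (a count of people, so outside the natural domain), where A's
-- skipped loop falls through to returning n itself while B returns n / gcd(|n|, 6).
def Pre_solution (n : Int) : Prop := 0 ≤ n
instance (n : Int) : Decidable (Pre_solution n) := by unfold Pre_solution; infer_instance
def pvWitness_solution : Int := (7)
def Spec_solution (n : Int) (out : Int) : Prop := out = solution_alt n
instance (n : Int) (out : Int) : Decidable (Spec_solution n out) := by unfold Spec_solution; infer_instance

-- ===== CLAIM (what is proved, stated in full; the proofs are below) =====
def Claim_equal_solution : Prop := ∀ (n : Int), Dom_solution n → Pre_solution n → Spec_solution n (solution n)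

-- ===== LEMMAS AND PROOFS =====

lemma loop_stop (fuel : Nat) (g a num p m : Int) (h : ¬ num ≤ g) :
    loopA (fuel+1) g a num p m = (a, p, m) := by
  simp only [loopA]; rw [if_neg h]

lemma loop_div (fuel : Nat) (g a num p m : Int) (h : num ≤ g)
    (hc : PySem.Int.mod p num = 0 ∧ PySem.Int.mod m num = 0) :
    loopA (fuel+1) g a num p m
      = loopA fuel g (a * num) 2 (PySem.Int.floordiv p num) (PySem.Int.floordiv m num) := by
  simp only [loopA]; rw [if_pos h, if_pos hc]

lemma loop_skip (fuel : Nat) (g a num p m : Int) (h : num ≤ g)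
    (hc : ¬ (PySem.Int.mod p num = 0 ∧ PySem.Int.mod m num = 0)) :
    loopA (fuel+1) g a num p m = loopA fuel g a (num + 1) p m := by
  simp only [loopA]; rw [if_pos h, if_neg hc]

-- pizza = 1: no num in 2..6 divides it, the loop just counts num up to 7 and stops
lemma tail_one (f : Nat) (a m : Int) : loopA (f+6) 6 a 2 1 m = (a, 1, m) :=
  calc loopA (f+6) 6 a 2 1 m
      = loopA (f+5) 6 a 3 1 m := loop_skip (f+5) 6 a 2 1 m (by norm_num) (fun h => absurd h.1 (by decide))
    _ = loopA (f+4) 6 a 4 1 m := loop_skip (f+4) 6 a 3 1 m (by norm_num) (fun h => absurd h.1 (by decide))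
    _ = loopA (f+3) 6 a 5 1 m := loop_skip (f+3) 6 a 4 1 m (by norm_num) (fun h => absurd h.1 (by decide))
    _ = loopA (f+2) 6 a 6 1 m := loop_skip (f+2) 6 a 5 1 m (by norm_num) (fun h => absurd h.1 (by decide))
    _ = loopA (f+1) 6 a 7 1 m := loop_skip (f+1) 6 a 6 1 m (by norm_num) (fun h => absurd h.1 (by decide))
    _ = (a, 1, m) := loop_stop f 6 a 7 1 m (by norm_num)

-- pizza = 3, 3 ∤ m, from num = 3: nums 3..6 all fail, loop stops
lemma tail_three (f : Nat) (a m : Int) (hm : ¬ m % 3 = 0) : loopA (f+5) 6 a 3 3 m = (a, 3, m) :=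
  calc loopA (f+5) 6 a 3 3 m
      = loopA (f+4) 6 a 4 3 m := loop_skip (f+4) 6 a 3 3 m (by norm_num)
        (fun h => hm (by rw [← PySem.Int.mod_eq_emod_of_pos (by norm_num : (0:Int) < 3)]; exact h.2))
    _ = loopA (f+3) 6 a 5 3 m := loop_skip (f+3) 6 a 4 3 m (by norm_num) (fun h => absurd h.1 (by decide))
    _ = loopA (f+2) 6 a 6 3 m := loop_skip (f+2) 6 a 5 3 m (by norm_num) (fun h => absurd h.1 (by decide))
    _ = loopA (f+1) 6 a 7 3 m := loop_skip (f+1) 6 a 6 3 m (by norm_num) (fun h => absurd h.1 (by decide))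
    _ = (a, 3, m) := loop_stop f 6 a 7 3 m (by norm_num)

-- pizza = 2, 2 ∤ m, from num = 2: nums 2..6 all fail, loop stops
lemma tail_two (f : Nat) (a m : Int) (hm : ¬ m % 2 = 0) : loopA (f+6) 6 a 2 2 m = (a, 2, m) :=
  calc loopA (f+6) 6 a 2 2 m
      = loopA (f+5) 6 a 3 2 m := loop_skip (f+5) 6 a 2 2 m (by norm_num)
        (fun h => hm (by rw [← PySem.Int.mod_eq_emod_of_pos (by norm_num : (0:Int) < 2)]; exact h.2))
    _ = loopA (f+4) 6 a 4 2 m := loop_skip (f+4) 6 a 3 2 m (by norm_num) (fun h => absurd h.1 (by decide))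
    _ = loopA (f+3) 6 a 5 2 m := loop_skip (f+3) 6 a 4 2 m (by norm_num) (fun h => absurd h.1 (by decide))
    _ = loopA (f+2) 6 a 6 2 m := loop_skip (f+2) 6 a 5 2 m (by norm_num) (fun h => absurd h.1 (by decide))
    _ = loopA (f+1) 6 a 7 2 m := loop_skip (f+1) 6 a 6 2 m (by norm_num) (fun h => absurd h.1 (by decide))
    _ = (a, 2, m) := loop_stop f 6 a 7 2 m (by norm_num)

-- pizza = 6, 2 ∤ m and 3 ∤ m, from num = 2: nums 2..6 all fail, loop stops
lemma tail_six (f : Nat) (a m : Int) (hm2 : ¬ m % 2 = 0) (hm3 : ¬ m % 3 = 0) :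
    loopA (f+6) 6 a 2 6 m = (a, 6, m) :=
  calc loopA (f+6) 6 a 2 6 m
      = loopA (f+5) 6 a 3 6 m := loop_skip (f+5) 6 a 2 6 m (by norm_num)
        (fun h => hm2 (by rw [← PySem.Int.mod_eq_emod_of_pos (by norm_num : (0:Int) < 2)]; exact h.2))
    _ = loopA (f+4) 6 a 4 6 m := loop_skip (f+4) 6 a 3 6 m (by norm_num)
        (fun h => hm3 (by rw [← PySem.Int.mod_eq_emod_of_pos (by norm_num : (0:Int) < 3)]; exact h.2))
    _ = loopA (f+3) 6 a 5 6 m := loop_skip (f+3) 6 a 4 6 m (by norm_num) (fun h => absurd h.1 (by decide))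
    _ = loopA (f+2) 6 a 6 6 m := loop_skip (f+2) 6 a 5 6 m (by norm_num) (fun h => absurd h.1 (by decide))
    _ = loopA (f+1) 6 a 7 6 m := loop_skip (f+1) 6 a 6 6 m (by norm_num)
        (fun h => by have := h.2; rw [PySem.Int.mod_eq_emod_of_pos (by norm_num : (0:Int) < 6)] at this; omega)
    _ = (a, 6, m) := loop_stop f 6 a 7 6 m (by norm_num)

lemma gcd_six_key (n : Int) : Int.gcd n 6 = Nat.gcd (n.natAbs % 6) 6 := by
  rw [show Int.gcd n 6 = Nat.gcd n.natAbs 6 from rfl, Nat.gcd_comm, Nat.gcd_rec]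

lemma mod_cond (n : Int) (k : Int) (hk : 0 < k) (h : n % k = 0) : PySem.Int.mod n k = 0 := by
  rw [PySem.Int.mod_eq_emod_of_pos hk]; exact h

-- ===== VERDICT (by name: the statement is the Claim_ definition above) =====
theorem solution_spec : Claim_equal_solution := by
  intro n _ hpre
  unfold Spec_solution
  unfold Pre_solution at hpre
  by_cases hle : n ≤ 6
  · interval_cases n <;> decide
  · have h7 : 6 < n := by omega
    have hsol : solution n
        = PySem.Int.floordiv ((loopA 100 6 1 2 6 n).1 * (loopA 100 6 1 2 6 n).2.1 * (loopA 100 6 1 2 6 n).2.2) 6 := by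
      simp only [solution]; rw [if_pos h7]
    by_cases h2 : n % 2 = 0 <;> by_cases h3 : n % 3 = 0
    · -- 6 ∣ n
      have hd2 : PySem.Int.floordiv n 2 = n / 2 := PySem.Int.floordiv_eq_ediv_of_pos (by norm_num)
      have hd3 : PySem.Int.floordiv (n / 2) 3 = n / 2 / 3 := PySem.Int.floordiv_eq_ediv_of_pos (by norm_num)
      have hloop : loopA 100 6 1 2 6 n = (6, 1, n / 2 / 3) :=
        calc loopA 100 6 1 2 6 n
            = loopA 99 6 2 2 3 (PySem.Int.floordiv n 2) := by
              have := loop_div 99 6 1 2 6 n (by norm_num) ⟨by decide, mod_cond n 2 (by norm_num) h2⟩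
              simpa using this
          _ = loopA 98 6 2 3 3 (n / 2) := by rw [hd2]; exact loop_skip 98 6 2 2 3 (n/2) (by norm_num) (fun h => absurd h.1 (by decide))
          _ = loopA 97 6 6 2 1 (PySem.Int.floordiv (n/2) 3) := by
              have := loop_div 97 6 2 3 3 (n/2) (by norm_num) ⟨by decide, mod_cond (n/2) 3 (by norm_num) (by omega)⟩
              simpa using this
          _ = loopA 97 6 6 2 1 (n / 2 / 3) := by rw [hd3]
          _ = (6, 1, n / 2 / 3) := tail_one 91 6 (n / 2 / 3)
      have hg : Int.gcd n 6 = 6 := by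
        rw [gcd_six_key]; have : n.natAbs % 6 = 0 := by omega
        rw [this]; decide
      rw [hsol, hloop, solution_alt, hg]
      rw [PySem.Int.floordiv_eq_ediv_of_pos (by norm_num : (0:Int) < 6),
          PySem.Int.floordiv_eq_ediv_of_pos (by norm_num : (0:Int) < ((6:Nat):Int))]
      push_cast
      omega
    · -- 2 ∣ n, 3 ∤ n
      have hd2 : PySem.Int.floordiv n 2 = n / 2 := PySem.Int.floordiv_eq_ediv_of_pos (by norm_num)
      have hloop : loopA 100 6 1 2 6 n = (2, 3, n / 2) :=
        calc loopA 100 6 1 2 6 n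
            = loopA 99 6 2 2 3 (PySem.Int.floordiv n 2) := by
              have := loop_div 99 6 1 2 6 n (by norm_num) ⟨by decide, mod_cond n 2 (by norm_num) h2⟩
              simpa using this
          _ = loopA 98 6 2 3 3 (n / 2) := by rw [hd2]; exact loop_skip 98 6 2 2 3 (n/2) (by norm_num) (fun h => absurd h.1 (by decide))
          _ = (2, 3, n / 2) := tail_three 93 2 (n / 2) (by omega)
      have hg : Int.gcd n 6 = 2 := by
        rw [gcd_six_key]
        have : n.natAbs % 6 = 2 ∨ n.natAbs % 6 = 4 := by omega
        rcases this with h | h <;> rw [h] <;> decide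
      rw [hsol, hloop, solution_alt, hg]
      rw [PySem.Int.floordiv_eq_ediv_of_pos (by norm_num : (0:Int) < 6),
          PySem.Int.floordiv_eq_ediv_of_pos (by norm_num : (0:Int) < ((2:Nat):Int))]
      push_cast
      omega
    · -- 3 ∣ n, 2 ∤ n
      have hd3 : PySem.Int.floordiv n 3 = n / 3 := PySem.Int.floordiv_eq_ediv_of_pos (by norm_num)
      have hloop : loopA 100 6 1 2 6 n = (3, 2, n / 3) :=
        calc loopA 100 6 1 2 6 n
            = loopA 99 6 1 3 6 n := loop_skip 99 6 1 2 6 n (by norm_num)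
              (fun h => by have := h.2; rw [PySem.Int.mod_eq_emod_of_pos (by norm_num : (0:Int) < 2)] at this; omega)
          _ = loopA 98 6 3 2 2 (PySem.Int.floordiv n 3) := by
              have := loop_div 98 6 1 3 6 n (by norm_num) ⟨by decide, mod_cond n 3 (by norm_num) h3⟩
              simpa using this
          _ = loopA 98 6 3 2 2 (n / 3) := by rw [hd3]
          _ = (3, 2, n / 3) := tail_two 92 3 (n / 3) (by omega)
      have hg : Int.gcd n 6 = 3 := by
        rw [gcd_six_key]; have : n.natAbs % 6 = 3 := by omega
        rw [this]; decide
      rw [hsol, hloop, solution_alt, hg]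
      rw [PySem.Int.floordiv_eq_ediv_of_pos (by norm_num : (0:Int) < 6),
          PySem.Int.floordiv_eq_ediv_of_pos (by norm_num : (0:Int) < ((3:Nat):Int))]
      push_cast
      omega
    · -- gcd 1
      have hloop : loopA 100 6 1 2 6 n = (1, 6, n) :=
        tail_six 94 1 n (by omega) (by omega)
      have hg : Int.gcd n 6 = 1 := by
        rw [gcd_six_key]
        have : n.natAbs % 6 = 1 ∨ n.natAbs % 6 = 5 := by omega
        rcases this with h | h <;> rw [h] <;> decide
      rw [hsol, hloop, solution_alt, hg]
      rw [PySem.Int.floordiv_eq_ediv_of_pos (by norm_num : (0:Int) < 6),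
          PySem.Int.floordiv_eq_ediv_of_pos (by norm_num : (0:Int) < ((1:Nat):Int))]
      push_cast
      omega
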